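-- pv_equiv track=rewrite | github.com/deepakgupta82/migration-mvp | backend/app/tools/infrastructure_analysis_tool.py | _find_closest_component
-- ===== SOURCE A (Python) =====
-- from typing import Dict, List, Any, Optional, Tuple
--
-- def _find_closest_component(name: str, component_names: List[str]) -> Optional[str]:
--     """Find the closest matching component name"""
--     name_lower = name.lower()
--
--     # Exact match
--     for comp_name in component_names:
--         if comp_name.lower() == name_lower:
--             return comp_name
--
--     # Partial match
--     for comp_name in component_names:
--         if name_lower in comp_name.lower() or comp_name.lower() in name_lower:
--             return comp_name
--
--     return None
-- ===== SOURCE B (Python) =====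
-- from typing import List, Optional
--
-- def _find_closest_component(name: str, component_names: List[str]) -> Optional[str]:
--     """Single pass: return on exact match, remember the first partial match."""
--     name_lower = name.lower()
--     first_partial = None
--     for comp_name in component_names:
--         cl = comp_name.lower()
--         if cl == name_lower:
--             return comp_name
--         if first_partial is None and (name_lower in cl or cl in name_lower):
--             first_partial = comp_name
--     return first_partial
-- ===== Notes on version B (the rewrite author's own statement) =====
-- stated objective: alternative
-- what changed: Replaces A's two sequential scans with one pass that lowercases each name once, returns immediately on an exact match and records (without returning) the first partial match.
import Mathlib
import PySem

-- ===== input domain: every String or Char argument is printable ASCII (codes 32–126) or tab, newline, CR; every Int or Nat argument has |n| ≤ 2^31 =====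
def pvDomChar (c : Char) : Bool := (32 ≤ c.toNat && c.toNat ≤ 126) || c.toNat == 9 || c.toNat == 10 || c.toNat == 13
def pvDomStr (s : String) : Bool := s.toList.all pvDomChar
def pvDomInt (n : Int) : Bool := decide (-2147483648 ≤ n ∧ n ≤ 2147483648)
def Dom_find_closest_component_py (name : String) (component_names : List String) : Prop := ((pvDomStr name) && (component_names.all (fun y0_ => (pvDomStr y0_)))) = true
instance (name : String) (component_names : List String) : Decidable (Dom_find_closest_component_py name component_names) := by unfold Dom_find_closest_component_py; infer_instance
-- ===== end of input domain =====

-- B replaces A's two sequential scans with one pass that returns on an exact match and records the first partial match (alternative decomposition, same cost).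


-- ===== PORT A =====
def find_closest_component_py (name : String) (component_names : List String) : Option String :=
  let name_lower := PySem.Str.lower name
  match component_names.find? (fun comp_name => PySem.Str.lower comp_name == name_lower) with
  | some comp_name => some comp_name
  | none =>
    component_names.find? (fun comp_name =>
      PySem.Str.isIn name_lower (PySem.Str.lower comp_name) ||
      PySem.Str.isIn (PySem.Str.lower comp_name) name_lower)

-- ===== PORT B =====
def fccAltGo (name_lower : String) : List String → Option String → Option String
  | [], first_partial => first_partial
  | comp_name :: rest, first_partial =>
    let cl := PySem.Str.lower comp_name
    if cl == name_lower then some comp_name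
    else
      fccAltGo name_lower rest
        (if first_partial.isNone && (PySem.Str.isIn name_lower cl || PySem.Str.isIn cl name_lower)
         then some comp_name else first_partial)

def find_closest_component_py_alt (name : String) (component_names : List String) : Option String :=
  fccAltGo (PySem.Str.lower name) component_names none

-- ===== PRECONDITION & SPEC =====
def Spec_find_closest_component_py (name : String) (component_names : List String) (out : Option String) : Prop := out = find_closest_component_py_alt name component_names
instance (name : String) (component_names : List String) (out : Option String) : Decidable (Spec_find_closest_component_py name component_names out) := by unfold Spec_find_closest_component_py; infer_instance

-- ===== CLAIM (what is proved, stated in full; the proofs are below) =====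
def Claim_equal_find_closest_component_py : Prop := ∀ (name : String) (component_names : List String), Dom_find_closest_component_py name component_names → Spec_find_closest_component_py name component_names (find_closest_component_py name component_names)

-- ===== LEMMAS AND PROOFS =====

-- ===== VERDICT (by name: the statement is the Claim_ definition above) =====
lemma fccAltGo_eq (nl : String) (xs : List String) (fp : Option String) :
    fccAltGo nl xs fp =
      match xs.find? (fun c => PySem.Str.lower c == nl) with
      | some c => some c
      | none =>
        fp.orElse (fun _ => xs.find? (fun c =>
          PySem.Str.isIn nl (PySem.Str.lower c) || PySem.Str.isIn (PySem.Str.lower c) nl)) := by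
  induction xs generalizing fp with
  | nil => cases fp <;> rfl
  | cons c rest ih =>
    simp only [fccAltGo, List.find?_cons]
    cases hx : (PySem.Str.lower c == nl) with
    | true => rfl
    | false =>
      simp only [Bool.false_eq_true, if_false]
      rw [ih]
      cases hfe : rest.find? (fun c => PySem.Str.lower c == nl) with
      | some d => rfl
      | none =>
        cases fp with
        | some v => rfl
        | none =>
          cases hp : (PySem.Str.isIn nl (PySem.Str.lower c) || PySem.Str.isIn (PySem.Str.lower c) nl) with
          | true => rfl
          | false => rfl

theorem find_closest_component_py_spec : Claim_equal_find_closest_component_py := by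
  intro name component_names _
  unfold Spec_find_closest_component_py find_closest_component_py find_closest_component_py_alt
  rw [fccAltGo_eq]
  cases h : component_names.find? (fun c => PySem.Str.lower c == PySem.Str.lower name) <;> simp [h]
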